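-- pv_equiv track=rewrite | github.com/Arsen1302/Code-copy-detector | TestData/solutions/problem_1677_4.py | solution_1677_4
-- ===== SOURCE A (Python) =====
-- from typing import List
--
-- def solution_1677_4(nums: List[int], k: int) -> List[int]:
--     len_nums = len(nums)
--
--     decreasing = [1] * len_nums
--     left = nums[0]
--     count = 0
--     for i, n in enumerate(nums):
--         if n <= left:
--             count += 1
--         else:
--             count = 1
--         left = n
--         decreasing[i] = count
--
--     increasing = [1] * len_nums
--     right = nums[-1]
--     count = 0
--     for i in range(len_nums - 1, -1, -1):
--         if nums[i] <= right:
--             count += 1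
--         else:
--             count = 1
--         right = nums[i]
--         increasing[i] = count
--
--     return [i for i in range(k, len_nums - k)
--             if decreasing[i - 1] >= k and increasing[i + 1] >= k]
-- ===== SOURCE B (Python) =====
-- from typing import List
--
-- def solution_1677_4(nums: List[int], k: int) -> List[int]:
--     n = len(nums)
--     res = []
--     for i in range(k, n - k):
--         if all(nums[j] <= nums[j - 1] for j in range(i - k + 1, i)) and \
--            all(nums[j] <= nums[j + 1] for j in range(i + 1, i + k)):
--             res.append(i)
--     return res
-- ===== Notes on version B (the rewrite author's own statement) =====
-- stated objective: simpler
-- what changed: B drops both run-length tables (decreasing/increasing) and instead checks each candidate centre i directly by scanning its two k-wide arm windows with all(...), appending i when both arms are monotone.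
import Mathlib
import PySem

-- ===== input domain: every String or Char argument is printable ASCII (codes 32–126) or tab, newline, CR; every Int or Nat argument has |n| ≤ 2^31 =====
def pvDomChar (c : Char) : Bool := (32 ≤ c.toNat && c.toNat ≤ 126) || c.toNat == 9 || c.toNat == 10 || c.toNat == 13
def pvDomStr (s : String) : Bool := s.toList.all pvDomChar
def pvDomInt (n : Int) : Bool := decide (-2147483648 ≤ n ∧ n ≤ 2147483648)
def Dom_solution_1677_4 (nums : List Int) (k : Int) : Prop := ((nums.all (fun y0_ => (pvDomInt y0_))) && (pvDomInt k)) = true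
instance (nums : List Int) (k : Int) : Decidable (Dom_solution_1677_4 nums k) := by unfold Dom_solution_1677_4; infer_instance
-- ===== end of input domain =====

-- B replaces A's two precomputed run-length tables by a direct per-centre scan of the two k-wide arm windows: simpler, no tables.


-- ===== PORT A =====
-- A's first loop: walk nums carrying (left, count), emitting each count; the emitted
-- list (in iteration order) is exactly the `decreasing` table A fills in index order.
def pvDecCounts (left count : Int) : List Int → List Int
  | [] => []
  | n :: rest =>
    let c := if n ≤ left then count + 1 else 1
    c :: pvDecCounts n c rest

def solution_1677_4 (nums : List Int) (k : Int) : List Int :=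
  let lenNums : Int := nums.length
  let decreasing : List Int := pvDecCounts ((PySem.List.pyGet? nums 0).getD 0) 0 nums
  -- A's second loop: fold over range(len-1, -1, -1), prepending each count so the
  -- accumulator ends up in index order, exactly the `increasing` table.
  let increasing : List Int :=
    ((PySem.List.pyRange (lenNums - 1) (-1) (-1)).foldl
      (fun (st : Int × Int × List Int) i =>
        let v := (PySem.List.pyGet? nums i).getD 0
        let c := if v ≤ st.1 then st.2.1 + 1 else 1
        (v, c, c :: st.2.2))
      (((PySem.List.pyGet? nums (-1)).getD 0), 0, [])).2.2
  (PySem.List.pyRange k (lenNums - k) 1).filter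
    (fun i => decide (k ≤ (PySem.List.pyGet? decreasing (i - 1)).getD 0) &&
              decide (k ≤ (PySem.List.pyGet? increasing (i + 1)).getD 0))

-- ===== PORT B =====
def solution_1677_4_alt (nums : List Int) (k : Int) : List Int :=
  let n : Int := nums.length
  (PySem.List.pyRange k (n - k) 1).filter (fun i =>
    ((PySem.List.pyRange (i - k + 1) i 1).all (fun j =>
        decide ((PySem.List.pyGet? nums j).getD 0 ≤ (PySem.List.pyGet? nums (j - 1)).getD 0))) &&
    ((PySem.List.pyRange (i + 1) (i + k) 1).all (fun j =>
        decide ((PySem.List.pyGet? nums j).getD 0 ≤ (PySem.List.pyGet? nums (j + 1)).getD 0))))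

-- ===== PRECONDITION & SPEC =====
-- A raises IndexError on empty nums (it reads nums[0]) and for k ≤ 0 (the final
-- comprehension then indexes increasing[len(nums)] or a too-negative decreasing index);
-- Pre_ excludes exactly those raising inputs.
def Pre_solution_1677_4 (nums : List Int) (k : Int) : Prop := nums ≠ [] ∧ 1 ≤ k
instance (nums : List Int) (k : Int) : Decidable (Pre_solution_1677_4 nums k) := by unfold Pre_solution_1677_4; infer_instance
def pvWitness_solution_1677_4 : List Int × Int := ([3, 2, 1, 2, 3], 1)

def Spec_solution_1677_4 (nums : List Int) (k : Int) (out : List Int) : Prop := out = solution_1677_4_alt nums k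
instance (nums : List Int) (k : Int) (out : List Int) : Decidable (Spec_solution_1677_4 nums k out) := by unfold Spec_solution_1677_4; infer_instance

-- ===== CLAIM (what is proved, stated in full; the proofs are below) =====
def Claim_equal_solution_1677_4 : Prop := ∀ (nums : List Int) (k : Int), Dom_solution_1677_4 nums k → Pre_solution_1677_4 nums k → Spec_solution_1677_4 nums k (solution_1677_4 nums k)

-- ===== LEMMAS AND PROOFS =====

-- value of nums[j] for 0 ≤ j, as a total List.getD
theorem pvGetv_eq (xs : List Int) (j : Int) (h : 0 ≤ j) :
    (PySem.List.pyGet? xs j).getD 0 = xs.getD j.toNat 0 := by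
  rw [PySem.List.pyGet?_of_nonneg xs h, List.getD_eq_getElem?_getD]

theorem pvDecCounts_length (l c : Int) (xs : List Int) :
    (pvDecCounts l c xs).length = xs.length := by
  induction xs generalizing l c with
  | nil => rfl
  | cons x rest ih => simp [pvDecCounts, ih]

-- value at index t of the table produced from boundary state (l, c)
def pvRunFrom (l c : Int) : List Int → Nat → Int
  | [], _ => 1
  | x :: _, 0 => if x ≤ l then c + 1 else 1
  | x :: rest, t + 1 => pvRunFrom x (if x ≤ l then c + 1 else 1) rest t

theorem pvDecCounts_getD (xs : List Int) (l c : Int) (t : Nat) (h : t < xs.length) :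
    (pvDecCounts l c xs).getD t 0 = pvRunFrom l c xs t := by
  induction xs generalizing l c t with
  | nil => simp at h
  | cons x rest ih =>
    cases t with
    | zero => simp [pvDecCounts, pvRunFrom]
    | succ t => simpa [pvDecCounts, pvRunFrom] using ih _ _ t (by simpa using h)

theorem pvRunFrom_pos (xs : List Int) (l c : Int) (t : Nat) (hc : 0 ≤ c) :
    1 ≤ pvRunFrom l c xs t := by
  induction xs generalizing l c t with
  | nil => simp [pvRunFrom]
  | cons x rest ih =>
    cases t with
    | zero => simp only [pvRunFrom]; split <;> omega
    | succ t => exact ih _ _ t (by split <;> omega)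

theorem pvRunFrom_zero (xs : List Int) (h : xs ≠ []) :
    pvRunFrom (xs.headD 0) 0 xs 0 = 1 := by
  cases xs with
  | nil => simp at h
  | cons x rest => simp [pvRunFrom]

theorem pvRunFrom_rec (t : Nat) (xs : List Int) (l c : Int) (h : t + 1 < xs.length) :
    pvRunFrom l c xs (t + 1) =
      if xs.getD (t + 1) 0 ≤ xs.getD t 0 then pvRunFrom l c xs t + 1 else 1 := by
  induction t generalizing xs l c with
  | zero =>
    match xs, h with
    | x :: y :: rest, _ => simp [pvRunFrom]
  | succ t ih =>
    match xs, h with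
    | x :: rest, h => simpa [pvRunFrom] using ih rest x _ (by simpa using h)

-- the run-length table entry ≥ k iff the k-wide window ending at t is non-increasing
theorem pvWindow (xs : List Int) (t : Nat) (k : Nat) (hk : 1 ≤ k) (ht : t < xs.length) :
    ((k : Int) ≤ pvRunFrom (xs.headD 0) 0 xs t ↔
      (k ≤ t + 1 ∧ ∀ j : Nat, j ≤ t → t + 1 < j + k → xs.getD j 0 ≤ xs.getD (j - 1) 0)) := by
  induction t generalizing k with
  | zero =>
    rw [pvRunFrom_zero xs (by intro h; subst h; simp at ht)]
    constructor
    · intro h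
      have : k ≤ 1 := by exact_mod_cast h
      exact ⟨by omega, fun j hj hjk => by omega⟩
    · intro ⟨h1, _⟩
      have : k ≤ 1 := h1
      exact_mod_cast (by omega : (k:Int) ≤ 1)
  | succ t ih =>
    rw [pvRunFrom_rec t xs _ _ ht]
    have hp := pvRunFrom_pos xs (xs.headD 0) 0 t (by norm_num)
    by_cases hcmp : xs.getD (t + 1) 0 ≤ xs.getD t 0
    · rw [if_pos hcmp]
      by_cases hk1 : k = 1
      · subst hk1
        constructor
        · intro _
          exact ⟨by omega, fun j hj hjk => by omega⟩
        · intro _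
          push_cast
          omega
      · have hk2 : 2 ≤ k := by omega
        have hcast : ((k : Int) ≤ pvRunFrom (xs.headD 0) 0 xs t + 1) ↔
            (((k - 1 : Nat) : Int) ≤ pvRunFrom (xs.headD 0) 0 xs t) := by
          push_cast [Nat.cast_sub (by omega : 1 ≤ k)]
          omega
        rw [hcast, ih (k - 1) (by omega) (by omega)]
        constructor
        · rintro ⟨h1, hw⟩
          refine ⟨by omega, ?_⟩
          intro j hj hjk
          rcases Nat.lt_or_ge j (t + 1) with hj' | hj'
          · exact hw j (by omega) (by omega)
          · have hje : j = t + 1 := by omega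
            subst hje
            simpa using hcmp
        · rintro ⟨h1, hw⟩
          exact ⟨by omega, fun j hj hjk => hw j (by omega) (by omega)⟩
    · rw [if_neg hcmp]
      constructor
      · intro h
        have hke : k = 1 := by
          have : (k : Int) ≤ 1 := h
          omega
        subst hke
        exact ⟨by omega, fun j hj hjk => by omega⟩
      · rintro ⟨h1, hw⟩
        by_cases hk1 : k = 1
        · subst hk1; norm_num
        · exfalso
          exact hcmp (by simpa using hw (t + 1) (by omega) (by omega))

theorem pvGetD_reverse {α : Type} (xs : List α) (k : Nat) (d : α) (h : k < xs.length) :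
    xs.reverse.getD k d = xs.getD (xs.length - 1 - k) d := by
  rw [List.getD_eq_getElem?_getD, List.getD_eq_getElem?_getD, List.getElem?_reverse h]

theorem pvHead0 (xs : List Int) : (PySem.List.pyGet? xs 0).getD 0 = xs.headD 0 := by
  cases xs with
  | nil => simp [PySem.List.pyGet?, PySem.List.pyIdx?]
  | cons x t => rw [PySem.List.pyGet?_zero_cons]; rfl

theorem pvLastGet (xs : List Int) : (PySem.List.pyGet? xs (-1)).getD 0 = xs.reverse.headD 0 := by
  rw [PySem.List.pyGet?_neg_one, List.headD_eq_head?_getD, List.head?_reverse]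

theorem pvRangeFold {α β : Type} (zs : List α) (d : α) (g : β → α → β) :
    ∀ init, (List.range zs.length).foldl (fun st k => g st (zs.getD k d)) init = zs.foldl g init := by
  induction zs using List.reverseRecOn with
  | nil => intro init; simp
  | append_singleton ws a ih =>
    intro init
    have hcong : List.foldl (fun st k => g st ((ws ++ [a]).getD k d)) init (List.range ws.length)
        = List.foldl (fun st k => g st (ws.getD k d)) init (List.range ws.length) :=
      PySem.List.foldl_congr_mem _ _ _ _
        (fun acc x hx => by rw [List.getD_append _ _ _ _ (List.mem_range.mp hx)])
    rw [List.length_append, List.length_cons, List.length_nil, Nat.zero_add, List.range_succ,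
        List.foldl_append, List.foldl_append, hcong, ih init]
    simp

theorem pvFold3 (ys : List Int) : ∀ (l c : Int) (acc : List Int),
    (ys.foldl (fun (st : Int × Int × List Int) v =>
       let c' := if v ≤ st.1 then st.2.1 + 1 else 1
       (v, c', c' :: st.2.2)) (l, c, acc)).2.2 = (pvDecCounts l c ys).reverse ++ acc := by
  induction ys with
  | nil => intro l c acc; simp [pvDecCounts]
  | cons y ys ih =>
    intro l c acc
    rw [List.foldl_cons]
    dsimp only
    rw [ih]
    simp [pvDecCounts]

theorem pvRangeDesc (n : Nat) :
    PySem.List.pyRange ((n:Int) - 1) (-1) (-1) = (List.range n).map (fun k : Nat => (n : Int) - 1 - (k : Int)) := by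
  by_cases h : 0 < n
  · conv_lhs => simp [PySem.List.pyRange, h]
    exact List.map_congr_left fun k _ => by ring
  · have h0 : n = 0 := by omega
    subst h0
    simp [PySem.List.pyRange]

theorem pvLoop2 (nums : List Int) (l0 c0 : Int) (acc0 : List Int) :
    ((PySem.List.pyRange ((nums.length : Int) - 1) (-1) (-1)).foldl
      (fun (st : Int × Int × List Int) i =>
        let v := (PySem.List.pyGet? nums i).getD 0
        let c := if v ≤ st.1 then st.2.1 + 1 else 1
        (v, c, c :: st.2.2))
      (l0, c0, acc0)).2.2 = (pvDecCounts l0 c0 nums.reverse).reverse ++ acc0 := by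
  rw [pvRangeDesc nums.length, List.foldl_map]
  have hcong : List.foldl
      (fun (st : Int × Int × List Int) (k : Nat) =>
        let v := (PySem.List.pyGet? nums ((nums.length : Int) - 1 - (k : Int))).getD 0
        let c := if v ≤ st.1 then st.2.1 + 1 else 1
        (v, c, c :: st.2.2)) (l0, c0, acc0) (List.range nums.length)
      = List.foldl
      (fun (st : Int × Int × List Int) (k : Nat) =>
        let v := nums.reverse.getD k 0
        let c := if v ≤ st.1 then st.2.1 + 1 else 1
        (v, c, c :: st.2.2)) (l0, c0, acc0) (List.range nums.length) := by
    refine PySem.List.foldl_congr_mem _ _ _ _ (fun acc x hx => ?_)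
    have hx' := List.mem_range.mp hx
    have hv : (PySem.List.pyGet? nums ((nums.length : Int) - 1 - (x : Int))).getD 0
        = nums.reverse.getD x 0 := by
      rw [pvGetv_eq nums _ (by omega), pvGetD_reverse nums x 0 hx']
      congr 1
      omega
    simp only [hv]
  rw [hcong]
  have hlen : List.range nums.length = List.range nums.reverse.length := by
    rw [List.length_reverse]
  rw [hlen]
  have h1 := pvRangeFold nums.reverse 0
      (fun (st : Int × Int × List Int) v =>
        let c' := if v ≤ st.1 then st.2.1 + 1 else 1
        (v, c', c' :: st.2.2)) (l0, c0, acc0)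
  have h2 := pvFold3 nums.reverse l0 c0 acc0
  exact (congrArg (fun t : Int × Int × List Int => t.2.2) h1).trans h2

theorem pvLeft (nums : List Int) (k i : Int) (hk : 1 ≤ k)
    (hi1 : k ≤ i) (hi2 : i < (nums.length : Int) - k) :
    decide (k ≤ (PySem.List.pyGet? (pvDecCounts ((PySem.List.pyGet? nums 0).getD 0) 0 nums) (i - 1)).getD 0)
      = (PySem.List.pyRange (i - k + 1) i 1).all (fun j =>
          decide ((PySem.List.pyGet? nums j).getD 0 ≤ (PySem.List.pyGet? nums (j - 1)).getD 0)) := by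
  have hn : 2 * k + 1 ≤ (nums.length : Int) := by omega
  have hkk : ((k.toNat : Int)) = k := by omega
  rw [Bool.eq_iff_iff]
  simp only [decide_eq_true_eq, List.all_eq_true]
  rw [pvHead0, pvGetv_eq _ _ (by omega : (0:Int) ≤ i - 1)]
  have htn : (i - 1).toNat < nums.length := by omega
  rw [pvDecCounts_getD nums _ _ _ htn, ← hkk,
      pvWindow nums (i - 1).toNat k.toNat (by omega) htn]
  constructor
  · rintro ⟨h1, hw⟩ j hj
    rw [PySem.List.mem_pyRange_one] at hj
    obtain ⟨hj1, hj2⟩ := hj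
    have hres := hw j.toNat (by omega) (by omega)
    rw [pvGetv_eq _ _ (by omega : (0:Int) ≤ j),
        pvGetv_eq _ _ (by omega : (0:Int) ≤ j - 1)]
    have he : (j - 1).toNat = j.toNat - 1 := by omega
    rw [he]
    exact hres
  · intro hall
    refine ⟨by omega, fun j hj hjk => ?_⟩
    have hj1 : 1 ≤ j := by omega
    have hthis := hall (j : Int) (PySem.List.mem_pyRange_one.mpr ⟨by omega, by omega⟩)
    rw [pvGetv_eq _ _ (by omega : (0:Int) ≤ (j:Int)),
        pvGetv_eq _ _ (by omega : (0:Int) ≤ (j:Int) - 1)] at hthis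
    have h1 : ((j : Int)).toNat = j := by omega
    have h2 : ((j : Int) - 1).toNat = j - 1 := by omega
    rw [h1, h2] at hthis
    exact hthis

theorem pvRight (nums : List Int) (k i : Int) (hk : 1 ≤ k)
    (hi1 : k ≤ i) (hi2 : i < (nums.length : Int) - k) :
    decide (k ≤ (PySem.List.pyGet? ((pvDecCounts ((PySem.List.pyGet? nums (-1)).getD 0) 0 nums.reverse).reverse) (i + 1)).getD 0)
      = (PySem.List.pyRange (i + 1) (i + k) 1).all (fun j =>
          decide ((PySem.List.pyGet? nums j).getD 0 ≤ (PySem.List.pyGet? nums (j + 1)).getD 0)) := by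
  have hn : 2 * k + 1 ≤ (nums.length : Int) := by omega
  have hkk : ((k.toNat : Int)) = k := by omega
  rw [Bool.eq_iff_iff]
  simp only [decide_eq_true_eq, List.all_eq_true]
  rw [pvLastGet, pvGetv_eq _ _ (by omega : (0:Int) ≤ i + 1)]
  have hlen : (pvDecCounts (nums.reverse.headD 0) 0 nums.reverse).length = nums.length := by
    rw [pvDecCounts_length, List.length_reverse]
  have htn : (i + 1).toNat < (pvDecCounts (nums.reverse.headD 0) 0 nums.reverse).length := by
    rw [hlen]; omega
  rw [pvGetD_reverse _ _ _ htn, hlen]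
  have hmn : nums.length - 1 - (i + 1).toNat < nums.reverse.length := by
    rw [List.length_reverse]; omega
  rw [pvDecCounts_getD nums.reverse _ _ _ hmn, ← hkk,
      pvWindow nums.reverse (nums.length - 1 - (i + 1).toNat) k.toNat (by omega)
        (by rw [List.length_reverse]; omega)]
  constructor
  · rintro ⟨h1, hw⟩ j hj
    rw [PySem.List.mem_pyRange_one] at hj
    obtain ⟨hj1, hj2⟩ := hj
    have hres := hw (nums.length - 1 - j.toNat) (by omega) (by omega)
    rw [pvGetD_reverse nums _ _ (by omega), pvGetD_reverse nums _ _ (by omega)] at hres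
    have e1 : nums.length - 1 - (nums.length - 1 - j.toNat) = j.toNat := by omega
    have e2 : nums.length - 1 - ((nums.length - 1 - j.toNat) - 1) = j.toNat + 1 := by omega
    rw [e1, e2] at hres
    rw [pvGetv_eq _ _ (by omega : (0:Int) ≤ j), pvGetv_eq _ _ (by omega : (0:Int) ≤ j + 1)]
    have e3 : (j + 1).toNat = j.toNat + 1 := by omega
    rw [e3]
    exact hres
  · intro hall
    refine ⟨by omega, fun j hj hjk => ?_⟩
    have hj1 : 1 ≤ j := by omega
    have hthis := hall ((nums.length - 1 - j : Nat) : Int)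
      (PySem.List.mem_pyRange_one.mpr ⟨by omega, by omega⟩)
    rw [pvGetv_eq _ _ (by omega), pvGetv_eq _ _ (by omega)] at hthis
    have e1 : (((nums.length - 1 - j : Nat) : Int)).toNat = nums.length - 1 - j := by omega
    have e2 : (((nums.length - 1 - j : Nat) : Int) + 1).toNat = nums.length - j := by omega
    rw [e1, e2] at hthis
    rw [pvGetD_reverse nums j 0 (by omega), pvGetD_reverse nums (j - 1) 0 (by omega)]
    have e3 : nums.length - 1 - (j - 1) = nums.length - j := by omega
    rw [e3]
    exact hthis

theorem solution_1677_4_spec : Claim_equal_solution_1677_4 := by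
  intro nums k _ hpre
  obtain ⟨hne, hk⟩ := hpre
  unfold Spec_solution_1677_4
  unfold solution_1677_4 solution_1677_4_alt
  dsimp only
  refine List.filter_congr (fun i hi => ?_)
  rw [PySem.List.mem_pyRange_one] at hi
  obtain ⟨hi1, hi2⟩ := hi
  rw [pvLoop2 nums _ _ _, List.append_nil]
  rw [pvLeft nums k i hk hi1 hi2, pvRight nums k i hk hi1 hi2]
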